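-- pv_equiv track=rewrite | github.com/woot644/Lashe-website | jlm_audio/generate_pages.py | fix_sidebar
-- ===== SOURCE A (Python) =====
-- def fix_sidebar(h):
--     links = {
--         '500 DIY Kits': '500-diy-kits.html', 'Power Supplies and Kits': 'power-supplies.html',
--         'Mic Pre Kits': 'mic-pre-kits.html', 'Compressor Kits': 'compressor-kits.html',
--         'Equaliser Kits': 'equaliser-kits.html', 'VU Meter Kits': 'vu-meter-kits.html',
--         'Small Interface Kits': 'small-interface-kits.html', 'Amp Kits': 'amp-kits.html',
--         'Sontec / ITI Mods': 'sontec-iti-mods.html', 'Synth Mods': 'synth-mods.html',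
--         'Opamps': 'opamps.html', 'Audio Transformers': 'audio-transformers.html',
--         'Pots and Knobs': 'pots-and-knobs.html', 'Switches': 'switches.html',
--         'Other Parts': 'other-parts.html',
--     }
--     h = h.replace('href="#">Testing Kits', 'href="testing-kits.html">Testing Kits')
--     for name, href in links.items():
--         h = h.replace(f'href="#" class="sub">{name}', f'href="{href}" class="sub">{name}')
--         h = h.replace(f'href="#">{name}', f'href="{href}">{name}')
--     return h
-- ===== SOURCE B (Python) =====
-- def fix_sidebar(h):
--     # same link data as the sidebar spec, as (name, href) pairs
--     pairs = [
--         ('500 DIY Kits', '500-diy-kits.html'),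
--         ('Power Supplies and Kits', 'power-supplies.html'),
--         ('Mic Pre Kits', 'mic-pre-kits.html'),
--         ('Compressor Kits', 'compressor-kits.html'),
--         ('Equaliser Kits', 'equaliser-kits.html'),
--         ('VU Meter Kits', 'vu-meter-kits.html'),
--         ('Small Interface Kits', 'small-interface-kits.html'),
--         ('Amp Kits', 'amp-kits.html'),
--         ('Sontec / ITI Mods', 'sontec-iti-mods.html'),
--         ('Synth Mods', 'synth-mods.html'),
--         ('Opamps', 'opamps.html'),
--         ('Audio Transformers', 'audio-transformers.html'),
--         ('Pots and Knobs', 'pots-and-knobs.html'),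
--         ('Switches', 'switches.html'),
--         ('Other Parts', 'other-parts.html'),
--     ]
--     # single left-to-right pass: at each placeholder-anchor occurrence, look at what follows
--     # and rewrite the anchor in place (Testing Kits only in its non-sub form).
--     rules = [('>Testing Kits', 'href="testing-kits.html">Testing Kits')]
--     for name, href in pairs:
--         rules.append((f' class="sub">{name}', f'href="{href}" class="sub">{name}'))
--         rules.append((f'>{name}', f'href="{href}">{name}'))
--     out = []
--     i = 0
--     while True:
--         j = h.find('href="#"', i)
--         if j < 0:
--             out.append(h[i:])
--             return ''.join(out)
--         out.append(h[i:j])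
--         for suf, rep in rules:
--             if h.startswith(suf, j + 8):
--                 out.append(rep)
--                 i = j + 8 + len(suf)
--                 break
--         else:
--             out.append('href="#"')
--             i = j + 8
-- ===== Notes on version B (the rewrite author's own statement) =====
-- stated objective: faster
-- what changed: A makes 31 sequential whole-string str.replace passes (one per sidebar link form); B builds the rule table once and rewrites all sidebar anchors in a single left-to-right scan, looking up which link name follows each placeholder-anchor occurrence.
import Mathlib
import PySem

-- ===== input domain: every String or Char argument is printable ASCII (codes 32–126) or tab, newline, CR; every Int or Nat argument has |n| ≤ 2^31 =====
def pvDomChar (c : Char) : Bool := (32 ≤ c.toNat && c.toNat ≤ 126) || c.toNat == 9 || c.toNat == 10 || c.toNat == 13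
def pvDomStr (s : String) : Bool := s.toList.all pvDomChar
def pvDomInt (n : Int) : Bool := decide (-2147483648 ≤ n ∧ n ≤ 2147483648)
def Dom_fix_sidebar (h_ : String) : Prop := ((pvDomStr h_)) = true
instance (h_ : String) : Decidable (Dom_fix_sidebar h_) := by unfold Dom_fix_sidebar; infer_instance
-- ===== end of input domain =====

-- B replaces A's 31 sequential whole-string `.replace` passes by ONE left-to-right scan with a
-- rule table keyed on what follows each placeholder-anchor occurrence; same value, proved below.

-- ===== PORT A =====
def fix_sidebar (h_ : String) : String :=
  let links : List (String × String) :=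
    [("500 DIY Kits", "500-diy-kits.html"),
     ("Power Supplies and Kits", "power-supplies.html"),
     ("Mic Pre Kits", "mic-pre-kits.html"),
     ("Compressor Kits", "compressor-kits.html"),
     ("Equaliser Kits", "equaliser-kits.html"),
     ("VU Meter Kits", "vu-meter-kits.html"),
     ("Small Interface Kits", "small-interface-kits.html"),
     ("Amp Kits", "amp-kits.html"),
     ("Sontec / ITI Mods", "sontec-iti-mods.html"),
     ("Synth Mods", "synth-mods.html"),
     ("Opamps", "opamps.html"),
     ("Audio Transformers", "audio-transformers.html"),
     ("Pots and Knobs", "pots-and-knobs.html"),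
     ("Switches", "switches.html"),
     ("Other Parts", "other-parts.html")]
  let h1 := PySem.Str.replace h_ "href=\"#\">Testing Kits" "href=\"testing-kits.html\">Testing Kits"
  List.foldl (fun h nh =>
      PySem.Str.replace
        (PySem.Str.replace h ("href=\"#\" class=\"sub\">" ++ nh.1)
          ("href=\"" ++ nh.2 ++ "\" class=\"sub\">" ++ nh.1))
        ("href=\"#\">" ++ nh.1) ("href=\"" ++ nh.2 ++ "\">" ++ nh.1)) h1 links

-- ===== PORT B =====
-- Source B's while-loop: h.find(anchor, i) advances to the next anchor occurrence (str.find scans forward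
-- one position at a time — ported as exactly that one-char step), then the first rule whose suffix
-- follows the occurrence is applied.  Hand-ported step for step; exact for str.find/str.startswith.
def pvScanB (rules : List (List Char × List Char)) : List Char → List Char
  | [] => []
  | ch :: t =>
    if ("href=\"#\"".toList).isPrefixOf (ch :: t) then
      match List.find? (fun pr => pr.1.isPrefixOf (List.drop 7 t)) rules with
      | some pr => pr.2 ++ pvScanB rules (List.drop pr.1.length (List.drop 7 t))
      | none => "href=\"#\"".toList ++ pvScanB rules (List.drop 7 t)
    else ch :: pvScanB rules t
termination_by s => s.length
decreasing_by all_goals (simp; try omega)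

def fix_sidebar_alt (h_ : String) : String :=
  let pairs : List (String × String) :=
    [("500 DIY Kits", "500-diy-kits.html"),
     ("Power Supplies and Kits", "power-supplies.html"),
     ("Mic Pre Kits", "mic-pre-kits.html"),
     ("Compressor Kits", "compressor-kits.html"),
     ("Equaliser Kits", "equaliser-kits.html"),
     ("VU Meter Kits", "vu-meter-kits.html"),
     ("Small Interface Kits", "small-interface-kits.html"),
     ("Amp Kits", "amp-kits.html"),
     ("Sontec / ITI Mods", "sontec-iti-mods.html"),
     ("Synth Mods", "synth-mods.html"),
     ("Opamps", "opamps.html"),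
     ("Audio Transformers", "audio-transformers.html"),
     ("Pots and Knobs", "pots-and-knobs.html"),
     ("Switches", "switches.html"),
     ("Other Parts", "other-parts.html")]
  let rules : List (String × String) :=
    List.foldl (fun rs nh =>
        rs ++ [(" class=\"sub\">" ++ nh.1, "href=\"" ++ nh.2 ++ "\" class=\"sub\">" ++ nh.1),
               (">" ++ nh.1, "href=\"" ++ nh.2 ++ "\">" ++ nh.1)])
      [(">Testing Kits", "href=\"testing-kits.html\">Testing Kits")] pairs
  String.ofList (pvScanB (rules.map (fun pr => (pr.1.toList, pr.2.toList))) h_.toList)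

-- ===== PRECONDITION & SPEC =====
def Spec_fix_sidebar (h_ : String) (out : String) : Prop := out = fix_sidebar_alt h_
instance (h_ : String) (out : String) : Decidable (Spec_fix_sidebar h_ out) := by unfold Spec_fix_sidebar; infer_instance

-- ===== CLAIM (what is proved, stated in full; the proofs are below) =====
def Claim_equal_fix_sidebar : Prop := ∀ (h_ : String), Dom_fix_sidebar h_ → Spec_fix_sidebar h_ (fix_sidebar h_)

-- ===== LEMMAS AND PROOFS =====

-- the shared anchor prefix 'href="#"'
def pvC8 : List Char := "href=\"#\"".toList

-- one Python `str.replace` pass with a nonempty pattern, as plain structural recursion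
def pvRep1go (old new : List Char) : List Char → List Char
  | [] => []
  | ch :: t =>
    if old.isPrefixOf (ch :: t) then new ++ pvRep1go old new (List.drop (old.length - 1) t)
    else ch :: pvRep1go old new t
termination_by s => s.length
decreasing_by all_goals (simp; try omega)

-- total form matching PySem.Chars.replace (empty pattern: interleave)
def pvRep1 (old new s : List Char) : List Char :=
  if old.isEmpty then new ++ s.flatMap (fun c => c :: new) else pvRep1go old new s

def pvStep (s : List Char) (pr : List Char × List Char) : List Char := pvRep1 pr.1 pr.2 s

-- the 31 full patterns/replacements exactly as A's loop applies them, in A's order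
def pvPfull : List (List Char × List Char) :=
  [(("href=\"#\">Testing Kits" : String).toList, ("href=\"testing-kits.html\">Testing Kits" : String).toList),
   (("href=\"#\" class=\"sub\">" ++ "500 DIY Kits" : String).toList, ("href=\"" ++ "500-diy-kits.html" ++ "\" class=\"sub\">" ++ "500 DIY Kits" : String).toList),
   (("href=\"#\">" ++ "500 DIY Kits" : String).toList, ("href=\"" ++ "500-diy-kits.html" ++ "\">" ++ "500 DIY Kits" : String).toList),
   (("href=\"#\" class=\"sub\">" ++ "Power Supplies and Kits" : String).toList, ("href=\"" ++ "power-supplies.html" ++ "\" class=\"sub\">" ++ "Power Supplies and Kits" : String).toList),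
   (("href=\"#\">" ++ "Power Supplies and Kits" : String).toList, ("href=\"" ++ "power-supplies.html" ++ "\">" ++ "Power Supplies and Kits" : String).toList),
   (("href=\"#\" class=\"sub\">" ++ "Mic Pre Kits" : String).toList, ("href=\"" ++ "mic-pre-kits.html" ++ "\" class=\"sub\">" ++ "Mic Pre Kits" : String).toList),
   (("href=\"#\">" ++ "Mic Pre Kits" : String).toList, ("href=\"" ++ "mic-pre-kits.html" ++ "\">" ++ "Mic Pre Kits" : String).toList),
   (("href=\"#\" class=\"sub\">" ++ "Compressor Kits" : String).toList, ("href=\"" ++ "compressor-kits.html" ++ "\" class=\"sub\">" ++ "Compressor Kits" : String).toList),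
   (("href=\"#\">" ++ "Compressor Kits" : String).toList, ("href=\"" ++ "compressor-kits.html" ++ "\">" ++ "Compressor Kits" : String).toList),
   (("href=\"#\" class=\"sub\">" ++ "Equaliser Kits" : String).toList, ("href=\"" ++ "equaliser-kits.html" ++ "\" class=\"sub\">" ++ "Equaliser Kits" : String).toList),
   (("href=\"#\">" ++ "Equaliser Kits" : String).toList, ("href=\"" ++ "equaliser-kits.html" ++ "\">" ++ "Equaliser Kits" : String).toList),
   (("href=\"#\" class=\"sub\">" ++ "VU Meter Kits" : String).toList, ("href=\"" ++ "vu-meter-kits.html" ++ "\" class=\"sub\">" ++ "VU Meter Kits" : String).toList),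
   (("href=\"#\">" ++ "VU Meter Kits" : String).toList, ("href=\"" ++ "vu-meter-kits.html" ++ "\">" ++ "VU Meter Kits" : String).toList),
   (("href=\"#\" class=\"sub\">" ++ "Small Interface Kits" : String).toList, ("href=\"" ++ "small-interface-kits.html" ++ "\" class=\"sub\">" ++ "Small Interface Kits" : String).toList),
   (("href=\"#\">" ++ "Small Interface Kits" : String).toList, ("href=\"" ++ "small-interface-kits.html" ++ "\">" ++ "Small Interface Kits" : String).toList),
   (("href=\"#\" class=\"sub\">" ++ "Amp Kits" : String).toList, ("href=\"" ++ "amp-kits.html" ++ "\" class=\"sub\">" ++ "Amp Kits" : String).toList),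
   (("href=\"#\">" ++ "Amp Kits" : String).toList, ("href=\"" ++ "amp-kits.html" ++ "\">" ++ "Amp Kits" : String).toList),
   (("href=\"#\" class=\"sub\">" ++ "Sontec / ITI Mods" : String).toList, ("href=\"" ++ "sontec-iti-mods.html" ++ "\" class=\"sub\">" ++ "Sontec / ITI Mods" : String).toList),
   (("href=\"#\">" ++ "Sontec / ITI Mods" : String).toList, ("href=\"" ++ "sontec-iti-mods.html" ++ "\">" ++ "Sontec / ITI Mods" : String).toList),
   (("href=\"#\" class=\"sub\">" ++ "Synth Mods" : String).toList, ("href=\"" ++ "synth-mods.html" ++ "\" class=\"sub\">" ++ "Synth Mods" : String).toList),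
   (("href=\"#\">" ++ "Synth Mods" : String).toList, ("href=\"" ++ "synth-mods.html" ++ "\">" ++ "Synth Mods" : String).toList),
   (("href=\"#\" class=\"sub\">" ++ "Opamps" : String).toList, ("href=\"" ++ "opamps.html" ++ "\" class=\"sub\">" ++ "Opamps" : String).toList),
   (("href=\"#\">" ++ "Opamps" : String).toList, ("href=\"" ++ "opamps.html" ++ "\">" ++ "Opamps" : String).toList),
   (("href=\"#\" class=\"sub\">" ++ "Audio Transformers" : String).toList, ("href=\"" ++ "audio-transformers.html" ++ "\" class=\"sub\">" ++ "Audio Transformers" : String).toList),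
   (("href=\"#\">" ++ "Audio Transformers" : String).toList, ("href=\"" ++ "audio-transformers.html" ++ "\">" ++ "Audio Transformers" : String).toList),
   (("href=\"#\" class=\"sub\">" ++ "Pots and Knobs" : String).toList, ("href=\"" ++ "pots-and-knobs.html" ++ "\" class=\"sub\">" ++ "Pots and Knobs" : String).toList),
   (("href=\"#\">" ++ "Pots and Knobs" : String).toList, ("href=\"" ++ "pots-and-knobs.html" ++ "\">" ++ "Pots and Knobs" : String).toList),
   (("href=\"#\" class=\"sub\">" ++ "Switches" : String).toList, ("href=\"" ++ "switches.html" ++ "\" class=\"sub\">" ++ "Switches" : String).toList),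
   (("href=\"#\">" ++ "Switches" : String).toList, ("href=\"" ++ "switches.html" ++ "\">" ++ "Switches" : String).toList),
   (("href=\"#\" class=\"sub\">" ++ "Other Parts" : String).toList, ("href=\"" ++ "other-parts.html" ++ "\" class=\"sub\">" ++ "Other Parts" : String).toList),
   (("href=\"#\">" ++ "Other Parts" : String).toList, ("href=\"" ++ "other-parts.html" ++ "\">" ++ "Other Parts" : String).toList)]

-- the 31 suffix rules exactly as B builds them (what follows the placeholder anchor)
def pvSUFR : List (List Char × List Char) :=
  [((">Testing Kits" : String).toList, ("href=\"testing-kits.html\">Testing Kits" : String).toList),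
   ((" class=\"sub\">500 DIY Kits" : String).toList, ("href=\"500-diy-kits.html\" class=\"sub\">500 DIY Kits" : String).toList),
   ((">500 DIY Kits" : String).toList, ("href=\"500-diy-kits.html\">500 DIY Kits" : String).toList),
   ((" class=\"sub\">Power Supplies and Kits" : String).toList, ("href=\"power-supplies.html\" class=\"sub\">Power Supplies and Kits" : String).toList),
   ((">Power Supplies and Kits" : String).toList, ("href=\"power-supplies.html\">Power Supplies and Kits" : String).toList),
   ((" class=\"sub\">Mic Pre Kits" : String).toList, ("href=\"mic-pre-kits.html\" class=\"sub\">Mic Pre Kits" : String).toList),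
   ((">Mic Pre Kits" : String).toList, ("href=\"mic-pre-kits.html\">Mic Pre Kits" : String).toList),
   ((" class=\"sub\">Compressor Kits" : String).toList, ("href=\"compressor-kits.html\" class=\"sub\">Compressor Kits" : String).toList),
   ((">Compressor Kits" : String).toList, ("href=\"compressor-kits.html\">Compressor Kits" : String).toList),
   ((" class=\"sub\">Equaliser Kits" : String).toList, ("href=\"equaliser-kits.html\" class=\"sub\">Equaliser Kits" : String).toList),
   ((">Equaliser Kits" : String).toList, ("href=\"equaliser-kits.html\">Equaliser Kits" : String).toList),
   ((" class=\"sub\">VU Meter Kits" : String).toList, ("href=\"vu-meter-kits.html\" class=\"sub\">VU Meter Kits" : String).toList),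
   ((">VU Meter Kits" : String).toList, ("href=\"vu-meter-kits.html\">VU Meter Kits" : String).toList),
   ((" class=\"sub\">Small Interface Kits" : String).toList, ("href=\"small-interface-kits.html\" class=\"sub\">Small Interface Kits" : String).toList),
   ((">Small Interface Kits" : String).toList, ("href=\"small-interface-kits.html\">Small Interface Kits" : String).toList),
   ((" class=\"sub\">Amp Kits" : String).toList, ("href=\"amp-kits.html\" class=\"sub\">Amp Kits" : String).toList),
   ((">Amp Kits" : String).toList, ("href=\"amp-kits.html\">Amp Kits" : String).toList),
   ((" class=\"sub\">Sontec / ITI Mods" : String).toList, ("href=\"sontec-iti-mods.html\" class=\"sub\">Sontec / ITI Mods" : String).toList),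
   ((">Sontec / ITI Mods" : String).toList, ("href=\"sontec-iti-mods.html\">Sontec / ITI Mods" : String).toList),
   ((" class=\"sub\">Synth Mods" : String).toList, ("href=\"synth-mods.html\" class=\"sub\">Synth Mods" : String).toList),
   ((">Synth Mods" : String).toList, ("href=\"synth-mods.html\">Synth Mods" : String).toList),
   ((" class=\"sub\">Opamps" : String).toList, ("href=\"opamps.html\" class=\"sub\">Opamps" : String).toList),
   ((">Opamps" : String).toList, ("href=\"opamps.html\">Opamps" : String).toList),
   ((" class=\"sub\">Audio Transformers" : String).toList, ("href=\"audio-transformers.html\" class=\"sub\">Audio Transformers" : String).toList),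
   ((">Audio Transformers" : String).toList, ("href=\"audio-transformers.html\">Audio Transformers" : String).toList),
   ((" class=\"sub\">Pots and Knobs" : String).toList, ("href=\"pots-and-knobs.html\" class=\"sub\">Pots and Knobs" : String).toList),
   ((">Pots and Knobs" : String).toList, ("href=\"pots-and-knobs.html\">Pots and Knobs" : String).toList),
   ((" class=\"sub\">Switches" : String).toList, ("href=\"switches.html\" class=\"sub\">Switches" : String).toList),
   ((">Switches" : String).toList, ("href=\"switches.html\">Switches" : String).toList),
   ((" class=\"sub\">Other Parts" : String).toList, ("href=\"other-parts.html\" class=\"sub\">Other Parts" : String).toList),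
   ((">Other Parts" : String).toList, ("href=\"other-parts.html\">Other Parts" : String).toList)]

-- basic equations of pvRep1go
theorem pvRep1go_nil (old new : List Char) : pvRep1go old new [] = [] := by
  simp [pvRep1go]

theorem pvRep1go_cons_pos (old new : List Char) (ch : Char) (t : List Char)
    (h : old <+: ch :: t) :
    pvRep1go old new (ch :: t) = new ++ pvRep1go old new (List.drop (old.length - 1) t) := by
  rw [pvRep1go, if_pos (List.isPrefixOf_iff_prefix.mpr h)]

theorem pvRep1go_cons_neg (old new : List Char) (ch : Char) (t : List Char)
    (h : ¬ old <+: ch :: t) :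
    pvRep1go old new (ch :: t) = ch :: pvRep1go old new t := by
  rw [pvRep1go, if_neg (fun hx => h (List.isPrefixOf_iff_prefix.mp hx))]

theorem pvRep1_of_ne (old new s : List Char) (h : old ≠ []) :
    pvRep1 old new s = pvRep1go old new s := by
  rw [pvRep1, if_neg (by simp [List.isEmpty_iff, h])]

theorem pvRep1go_append_self (old new Y : List Char) (h : old ≠ []) :
    pvRep1go old new (old ++ Y) = new ++ pvRep1go old new Y := by
  match old, h with
  | o :: ot, _ =>
    have hpre : (o :: ot) <+: o :: (ot ++ Y) := by
      simpa using List.prefix_append (o :: ot) Y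
    rw [List.cons_append, pvRep1go_cons_pos _ _ _ _ hpre]
    simp [List.drop_left]

-- PySem bridge: Python's str.replace equals pvRep1
theorem pvGo_eq (old new : List Char) (hold : old ≠ []) :
    ∀ (fuel : Nat) (l acc : List Char), l.length ≤ fuel →
      PySem.Chars.replace.go old new fuel l acc = acc.reverse ++ pvRep1go old new l := by
  intro fuel
  induction fuel with
  | zero =>
    intro l acc hl
    have : l = [] := List.length_eq_zero_iff.mp (Nat.le_zero.mp hl)
    subst this
    simp [PySem.Chars.replace.go, pvRep1go_nil]
  | succ n ih =>
    intro l acc hl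
    match l with
    | [] => simp [PySem.Chars.replace.go, pvRep1go_nil]
    | c :: t =>
      have hl' : t.length + 1 ≤ n + 1 := by simpa using hl
      by_cases hp : old.isPrefixOf (c :: t)
      · have hp' : old <+: (c :: t) := List.isPrefixOf_iff_prefix.mp hp
        rw [PySem.Chars.replace.go]
        simp only [hp, if_true]
        have h1 : 1 ≤ old.length := by
          cases old with
          | nil => exact absurd rfl hold
          | cons _ _ => simp
        have hlen : ((c :: t).drop old.length).length ≤ n := by
          simp only [List.length_drop, List.length_cons]
          omega
        rw [ih _ _ hlen]
        rw [pvRep1go_cons_pos _ _ _ _ hp']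
        have hdrop : (c :: t).drop old.length = t.drop (old.length - 1) := by
          cases old with
          | nil => exact absurd rfl hold
          | cons o ot => simp
        rw [hdrop]
        simp
      · rw [PySem.Chars.replace.go]
        simp only [hp]
        rw [ih t (c :: acc) (by omega)]
        rw [pvRep1go_cons_neg _ _ _ _ (fun hx => hp (List.isPrefixOf_iff_prefix.mpr hx))]
        simp

@[simp] theorem pvReplace_toList (s o n : String) :
    (PySem.Str.replace s o n).toList = pvRep1 o.toList n.toList s.toList := by
  rw [PySem.Str.toList_replace]
  unfold PySem.Chars.replace pvRep1
  by_cases h : o.toList.isEmpty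
  · simp [h]
  · simp only [h, if_false, Bool.false_eq_true]
    have hne : o.toList ≠ [] := by simpa [List.isEmpty_iff] using h
    rw [pvGo_eq _ _ hne s.toList.length s.toList [] (le_refl _)]
    simp

theorem pvA_toList (h_ : String) :
    (fix_sidebar h_).toList = List.foldl pvStep h_.toList pvPfull := by
  simp only [fix_sidebar, List.foldl, pvReplace_toList, pvPfull, pvStep]

theorem pvB_toList (h_ : String) :
    (fix_sidebar_alt h_).toList = pvScanB pvSUFR h_.toList := by
  simp only [fix_sidebar_alt, String.toList_ofList]
  congr 1

-- conditions on the rule table, checked by `decide`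
abbrev pvSufOK (w r : List Char) : Prop :=
  ∀ k, k < w.length → ¬ (w.drop k <+: r) ∧ ¬ (r <+: w.drop k)

abbrev pvNoTouch (p u : List Char) : Prop :=
  ∀ q, q < u.length → ¬ (p <+: u.drop q) ∧ ¬ (u.drop q <+: p)

set_option maxHeartbeats 4000000 in
theorem pvFact1 : ∀ pr ∈ pvPfull, ∀ qr ∈ pvPfull, pvSufOK pr.1 qr.2 := by decide
set_option maxHeartbeats 4000000 in
theorem pvFact2 : ∀ pr ∈ pvPfull, ∀ qr ∈ pvPfull, pr.1 = qr.1 ∨ pvNoTouch pr.1 qr.1 := by decide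
set_option maxHeartbeats 4000000 in
theorem pvFact3 : ∀ pr ∈ pvPfull, ∀ qr ∈ pvPfull, pvNoTouch pr.1 qr.2 := by decide
theorem pvFactSelf : ∀ q, 1 ≤ q → q < 8 → ¬ (pvC8.drop q <+: pvC8) := by decide
theorem pvFactNodup : (pvPfull.map Prod.fst).Nodup := by decide
theorem pvFactMap : pvPfull = pvSUFR.map (fun pr => (pvC8 ++ pr.1, pr.2)) := by decide
theorem pvFactNe : ∀ pr ∈ pvPfull, pr.1 ≠ [] := by decide
theorem pvC8_len : pvC8.length = 8 := by decide

-- a pass cannot create a match of w at position 0 (w ranges over pattern suffixes)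
theorem pvPres (p r : List Char) :
    ∀ (n : Nat) (s w : List Char), s.length ≤ n → pvSufOK w r →
      ¬ w <+: s → ¬ w <+: pvRep1go p r s := by
  intro n
  induction n with
  | zero =>
    intro s w hl _ hns
    have : s = [] := List.length_eq_zero_iff.mp (Nat.le_zero.mp hl)
    subst this
    rwa [pvRep1go_nil]
  | succ n ih =>
    intro s w hl hsuf hns
    match s with
    | [] => rwa [pvRep1go_nil]
    | c :: t =>
      have hwne : w ≠ [] := fun h => hns (h ▸ List.nil_prefix)
      have hwpos : 0 < w.length := List.length_pos_iff.mpr hwne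
      by_cases hp : p <+: c :: t
      · rw [pvRep1go_cons_pos _ _ _ _ hp]
        intro hw
        have h0 := hsuf 0 hwpos
        rw [List.drop_zero] at h0
        rcases Nat.le_total w.length r.length with hle | hle
        · exact h0.1 (List.prefix_of_prefix_length_le hw (List.prefix_append _ _) hle)
        · exact h0.2 (List.prefix_of_prefix_length_le (List.prefix_append _ _) hw hle)
      · rw [pvRep1go_cons_neg _ _ _ _ hp]
        intro hw
        match w, hwne with
        | a :: w', _ =>
          obtain ⟨rfl, hw'⟩ := List.cons_prefix_cons.mp hw
          have hns' : ¬ w' <+: t := fun hx => hns (List.cons_prefix_cons.mpr ⟨rfl, hx⟩)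
          have hsuf' : pvSufOK w' r := by
            intro k hk
            have := hsuf (k + 1) (by simpa using Nat.succ_lt_succ hk)
            simpa using this
          exact ih t w' (by simpa using hl) hsuf' hns' hw'

-- a pass slides over a block u it can never touch
theorem pvSkip (p r : List Char) :
    ∀ (u : List Char), pvNoTouch p u → ∀ (X : List Char),
      pvRep1go p r (u ++ X) = u ++ pvRep1go p r X := by
  intro u
  induction u with
  | nil => intro _ X; simp
  | cons a u' ih =>
    intro ht X
    have h0 := ht 0 (by simp)
    rw [List.drop_zero] at h0
    have hnp : ¬ p <+: a :: (u' ++ X) := by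
      intro hp
      rcases Nat.le_total p.length (a :: u').length with hle | hle
      · exact h0.1 (List.prefix_of_prefix_length_le hp (by simpa using List.prefix_append (a :: u') X) hle)
      · exact h0.2 (List.prefix_of_prefix_length_le (by simpa using List.prefix_append (a :: u') X) hp hle)
    rw [List.cons_append, pvRep1go_cons_neg _ _ _ _ hnp]
    rw [ih (fun q hq => by simpa using ht (q + 1) (by simpa using Nat.succ_lt_succ hq)) X]
    simp

-- a sequence of passes slides over a block none of them can touch
theorem pvL1 :
    ∀ (rs : List (List Char × List Char)) (u : List Char),
      (∀ pr ∈ rs, pr.1 ≠ []) → (∀ pr ∈ rs, pvNoTouch pr.1 u) → ∀ (X : List Char),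
        List.foldl pvStep (u ++ X) rs = u ++ List.foldl pvStep X rs := by
  intro rs
  induction rs with
  | nil => intros; simp
  | cons pr rest ih =>
    intro u hne ht X
    simp only [List.foldl_cons]
    have hst : pvStep (u ++ X) pr = u ++ pvStep X pr := by
      rw [pvStep, pvStep, pvRep1_of_ne _ _ _ (hne pr (by simp)), pvRep1_of_ne _ _ _ (hne pr (by simp))]
      exact pvSkip pr.1 pr.2 u (ht pr (by simp)) X
    rw [hst, ih u (fun qr hqr => hne qr (by simp [hqr])) (fun qr hqr => ht qr (by simp [hqr])) (pvStep X pr)]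

-- a sequence of passes with no match at position 0 keeps the head character
theorem pvL2 (ch : Char) :
    ∀ (rs : List (List Char × List Char)), (∀ pr ∈ rs, pr ∈ pvPfull) →
      ∀ (t : List Char), (∀ pr ∈ rs, ¬ pr.1 <+: ch :: t) →
        List.foldl pvStep (ch :: t) rs = ch :: List.foldl pvStep t rs := by
  intro rs
  induction rs with
  | nil => intro _ t _; simp
  | cons pr rest ih =>
    intro hmem t h0
    have hprP : pr ∈ pvPfull := hmem pr (by simp)
    have hne : pr.1 ≠ [] := pvFactNe pr hprP
    have hnp : ¬ pr.1 <+: ch :: t := h0 pr (by simp)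
    have hstep : pvStep (ch :: t) pr = ch :: pvRep1go pr.1 pr.2 t := by
      rw [pvStep, pvRep1_of_ne _ _ _ hne, pvRep1go_cons_neg _ _ _ _ hnp]
    simp only [List.foldl_cons, hstep]
    have h0' : ∀ qr ∈ rest, ¬ qr.1 <+: ch :: pvRep1go pr.1 pr.2 t := by
      intro qr hqr
      have hq0 : ¬ qr.1 <+: ch :: t := h0 qr (by simp [hqr])
      have hres := pvPres pr.1 pr.2 (ch :: t).length (ch :: t) qr.1 (le_refl _)
        (pvFact1 qr (hmem qr (by simp [hqr])) pr hprP) hq0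
      rwa [pvRep1go_cons_neg _ _ _ _ hnp] at hres
    rw [ih (fun qr hqr => hmem qr (by simp [hqr])) (pvRep1go pr.1 pr.2 t) h0']
    rw [pvStep, pvRep1_of_ne _ _ _ hne]

-- all 31 passes slide over a block with no match at any offset into it
theorem pvL3 :
    ∀ (u X : List Char),
      (∀ q, q < u.length → ∀ pr ∈ pvPfull, ¬ pr.1 <+: u.drop q ++ X) →
        List.foldl pvStep (u ++ X) pvPfull = u ++ List.foldl pvStep X pvPfull := by
  intro u
  induction u with
  | nil => intro X _; simp
  | cons a u' ih =>
    intro X h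
    have h0 : ∀ pr ∈ pvPfull, ¬ pr.1 <+: a :: (u' ++ X) := by
      intro pr hpr
      have := h 0 (by simp) pr hpr
      simpa using this
    rw [List.cons_append, pvL2 a pvPfull (fun pr hpr => hpr) (u' ++ X) h0]
    rw [ih X (fun q hq pr hpr => by simpa using h (q + 1) (by simpa using Nat.succ_lt_succ hq) pr hpr)]
    simp

-- pvScanB step equations
theorem pvScan_nil (rules : List (List Char × List Char)) : pvScanB rules [] = [] := by
  simp [pvScanB]

theorem pvScan_cons_neg (rules : List (List Char × List Char)) (ch : Char) (t : List Char)
    (h : ¬ pvC8 <+: ch :: t) :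
    pvScanB rules (ch :: t) = ch :: pvScanB rules t := by
  rw [pvScanB, if_neg (fun hx : ("href=\"#\"".toList).isPrefixOf (ch :: t) = true =>
    h (List.isPrefixOf_iff_prefix.mp hx))]

theorem pvScan_cons_none (rules : List (List Char × List Char)) (ch : Char) (t : List Char)
    (hc : pvC8 <+: ch :: t)
    (hf : List.find? (fun pr => pr.1.isPrefixOf (List.drop 7 t)) rules = none) :
    pvScanB rules (ch :: t) = pvC8 ++ pvScanB rules (List.drop 7 t) := by
  rw [pvScanB, if_pos (show ("href=\"#\"".toList).isPrefixOf (ch :: t) = true from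
    List.isPrefixOf_iff_prefix.mpr hc), hf]
  rfl

theorem pvScan_cons_some (rules : List (List Char × List Char)) (ch : Char) (t : List Char)
    (m : List Char × List Char) (hc : pvC8 <+: ch :: t)
    (hf : List.find? (fun pr => pr.1.isPrefixOf (List.drop 7 t)) rules = some m) :
    pvScanB rules (ch :: t) = m.2 ++ pvScanB rules (List.drop m.1.length (List.drop 7 t)) := by
  rw [pvScanB, if_pos (show ("href=\"#\"".toList).isPrefixOf (ch :: t) = true from
    List.isPrefixOf_iff_prefix.mpr hc), hf]

theorem pvFoldlNilGen : ∀ (rs : List (List Char × List Char)), (∀ pr ∈ rs, pr.1 ≠ []) →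
    List.foldl pvStep [] rs = [] := by
  intro rs
  induction rs with
  | nil => simp
  | cons pr rest ih =>
    intro h
    simp only [List.foldl_cons]
    rw [pvStep, pvRep1_of_ne _ _ _ (h pr (by simp)), pvRep1go_nil]
    exact ih (fun qr hq => h qr (by simp [hq]))

theorem pvFoldlNil : List.foldl pvStep [] pvPfull = [] := pvFoldlNilGen pvPfull pvFactNe

-- the main equivalence: 31 sequential passes = one scan
theorem fix_sidebar_main : ∀ (n : Nat) (l : List Char), l.length ≤ n →
    List.foldl pvStep l pvPfull = pvScanB pvSUFR l := by
  intro n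
  induction n with
  | zero =>
    intro l hl
    have : l = [] := List.length_eq_zero_iff.mp (Nat.le_zero.mp hl)
    subst this
    rw [pvFoldlNil, pvScan_nil]
  | succ n ih =>
    intro l hl
    match l with
    | [] => rw [pvFoldlNil, pvScan_nil]
    | ch :: t =>
      have hl' : t.length + 1 ≤ n + 1 := by simpa using hl
      by_cases hc : pvC8 <+: ch :: t
      · have hsplit : pvC8 ++ (ch :: t).drop 8 = ch :: t := by
          have := List.prefix_iff_eq_append.mp hc
          rwa [pvC8_len] at this
        have hd8 : (ch :: t).drop 8 = t.drop 7 := by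
          simpa using List.drop_succ_cons (n := 7) (a := ch) (l := t)
        have e : ch :: t = pvC8 ++ t.drop 7 := by rw [← hd8, hsplit]
        cases hf : List.find? (fun pr => pr.1.isPrefixOf (List.drop 7 t)) pvSUFR with
        | none =>
          have hnone : ∀ sr ∈ pvSUFR, ¬ sr.1 <+: t.drop 7 := by
            intro sr hsr hx
            have := List.find?_eq_none.mp hf sr hsr
            exact this (List.isPrefixOf_iff_prefix.mpr hx)
          have hyp : ∀ q, q < pvC8.length → ∀ pr ∈ pvPfull, ¬ pr.1 <+: pvC8.drop q ++ t.drop 7 := by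
            intro q hq pr hpr
            obtain ⟨sr, hsr, rfl⟩ := List.mem_map.mp (pvFactMap ▸ hpr)
            rcases Nat.eq_zero_or_pos q with rfl | hqpos
            · rw [List.drop_zero]
              intro hx
              exact hnone sr hsr ((List.prefix_append_right_inj pvC8).mp hx)
            · intro hx
              have hC8 : pvC8 <+: pvC8.drop q ++ t.drop 7 :=
                (List.prefix_append pvC8 sr.1).trans hx
              have hdp : pvC8.drop q <+: pvC8.drop q ++ t.drop 7 := List.prefix_append _ _
              have : pvC8.drop q <+: pvC8 :=
                List.prefix_of_prefix_length_le hdp hC8 (by simp [List.length_drop])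
              exact pvFactSelf q hqpos (by rwa [pvC8_len] at hq) this
          rw [pvScan_cons_none pvSUFR ch t hc hf]
          rw [show List.foldl pvStep (ch :: t) pvPfull
              = List.foldl pvStep (pvC8 ++ t.drop 7) pvPfull from by rw [← e]]
          rw [pvL3 pvC8 (t.drop 7) hyp]
          rw [ih (t.drop 7) (by simp [List.length_drop]; omega)]
        | some m =>
          have hm : m.1 <+: t.drop 7 := by
            have := List.find?_some hf
            exact List.isPrefixOf_iff_prefix.mp this
          have hmem : m ∈ pvSUFR := List.mem_of_find?_eq_some hf
          have hpm : (pvC8 ++ m.1, m.2) ∈ pvPfull := by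
            rw [pvFactMap]
            exact List.mem_map.mpr ⟨m, hmem, rfl⟩
          have hX : ch :: t = (pvC8 ++ m.1) ++ List.drop m.1.length (t.drop 7) := by
            rw [e, List.append_assoc]
            congr 1
            exact (List.prefix_iff_eq_append.mp hm).symm
          obtain ⟨rs1, rs2, hsp⟩ := List.append_of_mem hpm
          have hnd := pvFactNodup
          rw [hsp, List.map_append, List.map_cons] at hnd
          have hnotin : (pvC8 ++ m.1) ∉ rs1.map Prod.fst ++ rs2.map Prod.fst :=
            (List.nodup_cons.mp (List.nodup_middle.mp hnd)).1
          have hmem1 : ∀ pr ∈ rs1, pr ∈ pvPfull := fun pr hpr => by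
            rw [hsp]; exact List.mem_append_left _ hpr
          have hmem2 : ∀ pr ∈ rs2, pr ∈ pvPfull := fun pr hpr => by
            rw [hsp]; exact List.mem_append_right _ (List.mem_cons_of_mem _ hpr)
          have hne1 : ∀ pr ∈ rs1, pr.1 ≠ [] := fun pr hpr => pvFactNe pr (hmem1 pr hpr)
          have hne2 : ∀ pr ∈ rs2, pr.1 ≠ [] := fun pr hpr => pvFactNe pr (hmem2 pr hpr)
          have hd1 : ∀ pr ∈ rs1, pr.1 ≠ pvC8 ++ m.1 := by
            intro pr hpr hx
            exact hnotin (List.mem_append_left _ (hx ▸ List.mem_map_of_mem hpr))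
          have hd2 : ∀ pr ∈ rs2, pr.1 ≠ pvC8 ++ m.1 := by
            intro pr hpr hx
            exact hnotin (List.mem_append_right _ (hx ▸ List.mem_map_of_mem hpr))
          have ht1 : ∀ pr ∈ rs1, pvNoTouch pr.1 (pvC8 ++ m.1) := fun pr hpr =>
            (pvFact2 pr (hmem1 pr hpr) (pvC8 ++ m.1, m.2) hpm).resolve_left (hd1 pr hpr)
          have ht2 : ∀ pr ∈ rs2, pvNoTouch pr.1 m.2 := fun pr hpr =>
            pvFact3 pr (hmem2 pr hpr) (pvC8 ++ m.1, m.2) hpm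
          have hpmne : pvC8 ++ m.1 ≠ [] := pvFactNe _ hpm
          set X := List.drop m.1.length (t.drop 7) with hXdef
          have key : List.foldl pvStep (ch :: t) pvPfull
              = m.2 ++ List.foldl pvStep X pvPfull := by
            rw [hX, hsp, List.foldl_append]
            rw [pvL1 rs1 (pvC8 ++ m.1) hne1 ht1 X]
            rw [List.foldl_cons]
            have hstep : pvStep ((pvC8 ++ m.1) ++ List.foldl pvStep X rs1) (pvC8 ++ m.1, m.2)
                = m.2 ++ pvStep (List.foldl pvStep X rs1) (pvC8 ++ m.1, m.2) := by
              rw [pvStep, pvStep, pvRep1_of_ne _ _ _ hpmne, pvRep1_of_ne _ _ _ hpmne]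
              exact pvRep1go_append_self _ _ _ hpmne
            rw [hstep]
            rw [pvL1 rs2 m.2 hne2 ht2 (pvStep (List.foldl pvStep X rs1) (pvC8 ++ m.1, m.2))]
            congr 1
            rw [List.foldl_append, List.foldl_cons]
          rw [key, pvScan_cons_some pvSUFR ch t m hc hf]
          congr 1
          exact ih X (by simp [hXdef, List.length_drop]; omega)
      · have hall : ∀ pr ∈ pvPfull, ¬ pr.1 <+: ch :: t := by
          intro pr hpr hx
          obtain ⟨sr, hsr, rfl⟩ := List.mem_map.mp (pvFactMap ▸ hpr)
          exact hc ((List.prefix_append pvC8 sr.1).trans hx)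
        rw [pvL2 ch pvPfull (fun pr hpr => hpr) t hall]
        rw [pvScan_cons_neg pvSUFR ch t hc]
        rw [ih t (by omega)]

-- ===== VERDICT (by name: the statement is the Claim_ definition above) =====
theorem fix_sidebar_spec : Claim_equal_fix_sidebar := by
  intro h_ _
  unfold Spec_fix_sidebar
  apply String.toList_inj.mp
  rw [pvA_toList, pvB_toList]
  exact fix_sidebar_main h_.toList.length h_.toList (le_refl _)
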